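-- pv_equiv track=rewrite | github.com/r0han0908/stage_profiler | stage_profiler.py | _extract_knative_service_from_selector
-- ===== SOURCE A (Python) =====
-- from typing import Optional, Tuple, Dict, List
--
-- def _extract_knative_service_from_selector(selector: str) -> Optional[str]:
--     if not selector:
--         return None
--     parts = [p.strip() for p in selector.split(",")]
--     for p in parts:
--         if p.startswith("serving.knative.dev/service="):
--             return p.split("=", 1)[1]
--     return None
-- ===== SOURCE B (Python) =====
-- from typing import Optional
--
-- def _extract_knative_service_from_selector(selector: str) -> Optional[str]:
--     labels = {}
--     for part in selector.split(","):
--         part = part.strip()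
--         if "=" in part:
--             key, value = part.split("=", 1)
--             labels.setdefault(key, value)
--     return labels.get("serving.knative.dev/service")
-- ===== Notes on version B (the rewrite author's own statement) =====
-- stated objective: idiomatic
-- what changed: Replaces the prefix-scan over stripped parts with a single pass that parses every labelled part into a first-occurrence dict (setdefault) and then looks the service label up with dict.get.
import Mathlib
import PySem

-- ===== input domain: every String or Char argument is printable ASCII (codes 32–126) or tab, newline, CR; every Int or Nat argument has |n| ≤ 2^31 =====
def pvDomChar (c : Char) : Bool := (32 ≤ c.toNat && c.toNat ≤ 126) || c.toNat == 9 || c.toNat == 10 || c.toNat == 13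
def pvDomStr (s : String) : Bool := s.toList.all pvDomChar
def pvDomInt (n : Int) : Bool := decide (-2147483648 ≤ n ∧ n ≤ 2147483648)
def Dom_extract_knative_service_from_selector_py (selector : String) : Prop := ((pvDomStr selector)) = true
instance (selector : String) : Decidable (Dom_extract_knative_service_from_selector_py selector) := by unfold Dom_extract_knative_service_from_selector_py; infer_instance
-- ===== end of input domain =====

-- B builds a first-occurrence dict of all key=value labels and looks the service key up, instead of scanning for the prefix; objective: idiomatic, same cost.

-- ===== PORT A =====
-- the for-loop of A over the stripped parts
def aLoop : List String → Option String
  | [] => none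
  | p :: rest =>
    if PySem.Str.startswith p "serving.knative.dev/service=" then
      PySem.List.pyGet? ((PySem.Str.splitMax? p "=" 1).getD []) 1
    else aLoop rest

def extract_knative_service_from_selector_py (selector : String) : Option String :=
  if selector == "" then none
  else aLoop (((PySem.Str.split? selector ",").getD []).map PySem.Str.strip)

-- ===== PORT B =====
-- the body of B's for-loop: strip the part, and if it contains '=', setdefault(key, value)
def bStep (labels : PySem.Dict String String) (part0 : String) : PySem.Dict String String :=
  let part := PySem.Str.strip part0
  if PySem.Str.isIn "=" part then
    match (PySem.Str.splitMax? part "=" 1).getD [] with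
    | key :: value :: _ => labels.setdefault key value
    | _ => labels
  else labels

def extract_knative_service_from_selector_py_alt (selector : String) : Option String :=
  ((((PySem.Str.split? selector ",").getD []).foldl bStep PySem.Dict.empty).get?
    "serving.knative.dev/service")

-- ===== PRECONDITION & SPEC =====
def Spec_extract_knative_service_from_selector_py (selector : String) (out : Option String) : Prop := out = extract_knative_service_from_selector_py_alt selector
instance (selector : String) (out : Option String) : Decidable (Spec_extract_knative_service_from_selector_py selector out) := by unfold Spec_extract_knative_service_from_selector_py; infer_instance

-- ===== CLAIM (what is proved, stated in full; the proofs are below) =====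
def Claim_equal_extract_knative_service_from_selector_py : Prop := ∀ (selector : String), Dom_extract_knative_service_from_selector_py selector → Spec_extract_knative_service_from_selector_py selector (extract_knative_service_from_selector_py selector)

-- ===== LEMMAS AND PROOFS =====

-- split at the FIRST occurrence of c, if any (proof-side characterisation of split(sep, 1))
def splitFirst (c : Char) : List Char → Option (List Char × List Char)
  | [] => none
  | x :: xs => if x = c then some ([], xs) else (splitFirst c xs).map (fun p => (x :: p.1, p.2))

lemma splitFirst_none_iff (c : Char) (l : List Char) : splitFirst c l = none ↔ c ∉ l := by
  induction l with
  | nil => simp [splitFirst]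
  | cons x xs ih =>
    by_cases h : x = c
    · subst h; simp [splitFirst]
    · simp [splitFirst, h, ih, Option.map_eq_none_iff]
      exact fun _ hc => h hc.symm

lemma splitFirst_some (c : Char) : ∀ (l a b : List Char), splitFirst c l = some (a, b) →
    l = a ++ c :: b ∧ c ∉ a := by
  intro l
  induction l with
  | nil => intro a b h; simp [splitFirst] at h
  | cons x xs ih =>
    intro a b h
    by_cases hx : x = c
    · subst hx
      simp [splitFirst] at h
      obtain ⟨rfl, rfl⟩ := h
      simp
    · have hx' : ¬ c = x := fun hc => hx hc.symm
      simp only [splitFirst, if_neg hx, Option.map_eq_some_iff] at h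
      obtain ⟨⟨a1, b1⟩, hsp, hpair⟩ := h
      rw [Prod.mk.injEq] at hpair
      obtain ⟨rfl, rfl⟩ := hpair
      obtain ⟨hl, hna⟩ := ih a1 b1 hsp
      subst hl
      exact ⟨by simp, by simp [hna, hx']⟩

lemma go_zero (sep : List Char) : ∀ (fuel : Nat) (l cur : List Char) (acc : List (List Char)),
    PySem.Chars.splitOnMax.go sep fuel 0 l cur acc = ((cur.reverse ++ l) :: acc).reverse := by
  intro fuel l cur acc
  match fuel, l with
  | 0, l => simp [PySem.Chars.splitOnMax.go]
  | fuel + 1, [] => simp [PySem.Chars.splitOnMax.go]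
  | fuel + 1, c :: rest => simp [PySem.Chars.splitOnMax.go]

lemma go_one (c : Char) : ∀ (fuel : Nat) (l cur : List Char) (acc : List (List Char)),
    l.length < fuel →
    PySem.Chars.splitOnMax.go [c] fuel 1 l cur acc =
      acc.reverse ++ (match splitFirst c l with
        | none => [cur.reverse ++ l]
        | some (a, b) => [cur.reverse ++ a, b]) := by
  intro fuel
  induction fuel with
  | zero => intro l cur acc h; omega
  | succ fuel ih =>
    intro l cur acc h
    match l with
    | [] => simp [PySem.Chars.splitOnMax.go, splitFirst]
    | x :: rest =>
      by_cases hx : x = c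
      · subst hx
        simp [PySem.Chars.splitOnMax.go, splitFirst, List.isPrefixOf, go_zero]
      · have hlt : rest.length < fuel := by simp at h; omega
        have hx' : ¬ c = x := fun hc => hx hc.symm
        have hpre : [c].isPrefixOf (x :: rest) = false := by
          simp [List.isPrefixOf, hx']
        simp only [PySem.Chars.splitOnMax.go, hpre, if_neg (by omega : ¬ (1 : Nat) = 0),
          Bool.false_eq_true, if_false]
        rw [ih rest (x :: cur) acc hlt]
        simp [splitFirst, hx, hx']
        cases hs : splitFirst c rest with
        | none => simp
        | some p => cases p with | mk a b => simp

lemma splitOnMax_one (c : Char) (cs : List Char) :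
    PySem.Chars.splitOnMax cs [c] 1 =
      (match splitFirst c cs with
        | none => [cs]
        | some (a, b) => [a, b]) := by
  have h1 : ¬ ((1 : Int) < 0) := by omega
  simp only [PySem.Chars.splitOnMax, if_neg h1]
  have : (1 : Int).toNat = 1 := rfl
  rw [this, go_one c (cs.length + 1) cs [] [] (by omega)]
  cases hs : splitFirst c cs with
  | none => simp
  | some p => cases p with | mk a b => simp

lemma splitMax_eq (q : String) :
    PySem.Str.splitMax? q "=" 1 =
      some ((match splitFirst '=' q.toList with
        | none => [q.toList]
        | some (a, b) => [a, b]).map String.ofList) := by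
  have hsep : ("=" : String).toList = ['='] := rfl
  simp only [PySem.Str.splitMax?, PySem.Chars.splitMax?, hsep]
  simp [splitOnMax_one]

lemma prefix_split (c : Char) : ∀ (k a b : List Char), c ∉ k → c ∉ a →
    ((k ++ [c]) <+: (a ++ c :: b) ↔ k = a) := by
  intro k
  induction k with
  | nil =>
    intro a b _ ha
    cases a with
    | nil => simp
    | cons y a' =>
      simp only [List.nil_append, List.cons_append, List.cons_prefix_cons]
      constructor
      · rintro ⟨rfl, -⟩; exact absurd (List.mem_cons_self) ha
      · intro h; exact absurd h (by simp)
  | cons x k' ih =>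
    intro a b hk ha
    cases a with
    | nil =>
      simp only [List.cons_append, List.nil_append, List.cons_prefix_cons]
      constructor
      · rintro ⟨rfl, -⟩; exact absurd (List.mem_cons_self) hk
      · intro h; exact absurd h (by simp)
    | cons y a' =>
      simp only [List.cons_append, List.cons_prefix_cons]
      have hk' : c ∉ k' := fun h => hk (List.mem_cons_of_mem _ h)
      have ha' : c ∉ a' := fun h => ha (List.mem_cons_of_mem _ h)
      rw [ih a' b hk' ha']
      constructor
      · rintro ⟨rfl, rfl⟩; rfl
      · intro h; injection h with h1 h2; exact ⟨h1, h2⟩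

lemma startswith_false_of_no_eq (q : String) (h : splitFirst '=' q.toList = none) :
    PySem.Str.startswith q "serving.knative.dev/service=" = false := by
  have hm : '=' ∉ q.toList := (splitFirst_none_iff _ _).mp h
  rw [PySem.Str.startswith_eq]
  simp only [PySem.Chars.startswith]
  rw [Bool.eq_false_iff]
  intro hpre
  have hp : ("serving.knative.dev/service=" : String).toList <+: q.toList :=
    List.isPrefixOf_iff_prefix.mp hpre
  exact hm (hp.subset (by decide))

lemma isIn_false_of_no_eq (q : String) (h : splitFirst '=' q.toList = none) :
    PySem.Str.isIn "=" q = false := by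
  have hm : '=' ∉ q.toList := (splitFirst_none_iff _ _).mp h
  rw [PySem.Str.isIn_eq, Bool.eq_false_iff]
  intro hin
  have : (("=" : String).toList) <:+: q.toList := (PySem.Chars.isIn_iff_infix _ _).mp hin
  exact hm (this.subset (by decide))

lemma isIn_true_of_eq (q : String) (a b : List Char) (h : splitFirst '=' q.toList = some (a, b)) :
    PySem.Str.isIn "=" q = true := by
  obtain ⟨hq, -⟩ := splitFirst_some '=' q.toList a b h
  rw [PySem.Str.isIn_eq, PySem.Chars.isIn_iff_infix]
  exact ⟨a, b, by rw [hq]; simp⟩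

lemma startswith_iff_key (q : String) (a b : List Char)
    (h : splitFirst '=' q.toList = some (a, b)) :
    (PySem.Str.startswith q "serving.knative.dev/service=" = true ↔
      a = ("serving.knative.dev/service" : String).toList) := by
  obtain ⟨hq, hna⟩ := splitFirst_some '=' q.toList a b h
  rw [PySem.Str.startswith_eq]
  simp only [PySem.Chars.startswith]
  rw [List.isPrefixOf_iff_prefix]
  have hKeq : ("serving.knative.dev/service=" : String).toList =
      ("serving.knative.dev/service" : String).toList ++ ['='] := by decide
  rw [hq, hKeq, prefix_split '=' _ a b (by decide) hna]
  exact eq_comm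

lemma bStep_none (d : PySem.Dict String String) (p : String)
    (hs : splitFirst '=' (PySem.Str.strip p).toList = none) : bStep d p = d := by
  simp only [bStep]
  rw [isIn_false_of_no_eq _ hs]
  simp

lemma bStep_some (d : PySem.Dict String String) (p : String) (a b : List Char)
    (hs : splitFirst '=' (PySem.Str.strip p).toList = some (a, b)) :
    bStep d p = d.setdefault (String.ofList a) (String.ofList b) := by
  have hsp := splitMax_eq (PySem.Str.strip p)
  rw [hs] at hsp
  simp only [List.map_cons, List.map_nil] at hsp
  simp only [bStep]
  rw [isIn_true_of_eq _ a b hs, hsp]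
  simp

lemma fold_get : ∀ (parts : List String) (d : PySem.Dict String String),
    (parts.foldl bStep d).get? "serving.knative.dev/service" =
      (d.get? "serving.knative.dev/service").or (aLoop (parts.map PySem.Str.strip)) := by
  intro parts
  induction parts with
  | nil =>
    intro d
    simp only [List.foldl_nil, List.map_nil, aLoop]
    cases d.get? "serving.knative.dev/service" <;> simp
  | cons p rest ih =>
    intro d
    simp only [List.foldl_cons, List.map_cons]
    rw [ih]
    cases hs : splitFirst '=' (PySem.Str.strip p).toList with
    | none =>
      rw [bStep_none d p hs, aLoop, startswith_false_of_no_eq _ hs]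
      simp
    | some ab =>
      obtain ⟨a, b⟩ := ab
      rw [bStep_some d p a b hs, aLoop]
      by_cases hk : a = ("serving.knative.dev/service" : String).toList
      · subst hk
        have hkey : String.ofList ("serving.knative.dev/service" : String).toList =
            "serving.knative.dev/service" := by simp
        rw [hkey]
        have hsw : PySem.Str.startswith (PySem.Str.strip p)
            "serving.knative.dev/service=" = true :=
          (startswith_iff_key _ _ b hs).mpr rfl
        rw [hsw]
        simp only [if_true]
        have hsp := splitMax_eq (PySem.Str.strip p)
        rw [hs] at hsp
        simp only [List.map_cons, List.map_nil] at hsp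
        rw [hsp, hkey]
        have hg : PySem.List.pyGet? ((some ["serving.knative.dev/service",
            String.ofList b]).getD []) (1 : Int) = some (String.ofList b) := by
          simp [PySem.List.pyGet?, PySem.List.pyIdx?]
        rw [hg, PySem.Dict.get?_setdefault_self]
        cases d.get? "serving.knative.dev/service" <;> simp
      · have hsw : PySem.Str.startswith (PySem.Str.strip p)
            "serving.knative.dev/service=" = false := by
          rw [Bool.eq_false_iff]
          intro h'
          exact hk ((startswith_iff_key _ a b hs).mp h')
        have hne : ("serving.knative.dev/service" : String) ≠ String.ofList a := by
          intro h'
          apply hk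
          simpa using (congrArg String.toList h').symm
        rw [hsw]
        simp only [Bool.false_eq_true, if_false]
        rw [PySem.Dict.get?_setdefault_of_ne d (String.ofList b) hne]

-- ===== VERDICT (by name: the statement is the Claim_ definition above) =====
theorem extract_knative_service_from_selector_py_spec : Claim_equal_extract_knative_service_from_selector_py := by
  intro selector _
  unfold Spec_extract_knative_service_from_selector_py
  by_cases h : selector = ""
  · subst h; decide
  · unfold extract_knative_service_from_selector_py extract_knative_service_from_selector_py_alt
    rw [if_neg (by simpa using h)]
    rw [fold_get]
    simp [PySem.Dict.get?_empty]
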